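-- pv_equiv track=rewrite | github.com/gaelzi1/PROYECTO_FINAL | tempCodeRunnerFile.py | correccion_logica
-- ===== SOURCE A (Python) =====
-- def correccion_logica(texto):
--     """Lógica para reparar errores comunes U->I, G->0, S->5"""
--     chars = list(texto)
--     # Reemplazos seguros basados en posición
--     for i in range(len(chars)):
--         c = chars[i]
--
--         # Correcciones numéricas (centro de la placa)
--         if 2 < i < len(chars)-1:
--             if c == 'B': chars[i] = '8'
--             if c == 'D': chars[i] = '0'
--             if c == 'S': chars[i] = '5'
--             if c == 'G': chars[i] = '6'
--
--         # Correcciones de letras (inicio de la placa)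
--         if i < 3:
--             if c == '1' or c == 'I': chars[i] = 'U' # Si empieza con I, es U
--             if c == '5': chars[i] = 'S'
--             if c == '0': chars[i] = '0' # O la letra D
--
--     return "".join(chars)
-- ===== SOURCE B (Python) =====
-- LETTER_RULES = (('1', 'U'), ('I', 'U'), ('5', 'S'))
-- NUMBER_RULES = (('B', '8'), ('D', '0'), ('S', '5'), ('G', '6'))
--
-- def correccion_logica(texto):
--     """Staged whole-region passes: one str.replace per correction rule (rule-driven,
--     no per-character loop). Safe because no rule's output is another rule's input."""
--     if len(texto) <= 3:
--         head, middle, tail = texto, '', ''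
--     else:
--         head, middle, tail = texto[:3], texto[3:-1], texto[-1]
--     for old, new in LETTER_RULES:
--         head = head.replace(old, new)
--     for old, new in NUMBER_RULES:
--         middle = middle.replace(old, new)
--     return head + middle + tail
-- ===== Notes on version B (the rewrite author's own statement) =====
-- stated objective: faster
-- what changed: Replaces A's single index-guarded per-character mutation loop with rule-driven staged passes: split the plate into head/middle/tail regions once, then run one whole-region str.replace pass per correction rule (loops iterate over the rule table, not over characters), moving the per-character work into C-level str.replace.
import Mathlib
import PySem

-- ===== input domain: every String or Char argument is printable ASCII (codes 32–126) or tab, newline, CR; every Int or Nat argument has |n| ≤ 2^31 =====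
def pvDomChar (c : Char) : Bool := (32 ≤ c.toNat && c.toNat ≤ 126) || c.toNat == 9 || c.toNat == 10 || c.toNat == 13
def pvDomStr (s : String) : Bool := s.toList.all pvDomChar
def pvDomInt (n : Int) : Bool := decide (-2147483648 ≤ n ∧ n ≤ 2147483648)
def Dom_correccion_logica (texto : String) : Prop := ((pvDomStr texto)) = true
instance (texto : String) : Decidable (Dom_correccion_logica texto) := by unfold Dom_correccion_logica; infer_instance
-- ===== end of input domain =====

-- B replaces A's index-guarded per-character loop with rule-driven staged passes: split once into head/middle/tail regions, then one whole-region replace pass per correction rule.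

-- ===== PORT A =====
-- one iteration of A's for-loop body: reads chars[i], conditionally sets it (branches in A's order)
def pvStepA (chars : List Char) (i : Nat) : List Char :=
  let c := chars.getD i ' '
  let chars1 :=
    if 2 < i ∧ i + 1 < chars.length then
      let a := if c = 'B' then chars.set i '8' else chars
      let b := if c = 'D' then a.set i '0' else a
      let d := if c = 'S' then b.set i '5' else b
      if c = 'G' then d.set i '6' else d
    else chars
  if i < 3 then
    let a := if c = '1' ∨ c = 'I' then chars1.set i 'U' else chars1
    let b := if c = '5' then a.set i 'S' else a
    if c = '0' then b.set i '0' else b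
  else chars1

def correccion_logica (texto : String) : String :=
  let chars := texto.toList
  String.ofList ((List.range chars.length).foldl pvStepA chars)

-- ===== PORT B =====
def pvLetterRules : List (Char × Char) := [('1', 'U'), ('I', 'U'), ('5', 'S')]
def pvNumberRules : List (Char × Char) := [('B', '8'), ('D', '0'), ('S', '5'), ('G', '6')]

def correccion_logica_alt (texto : String) : String :=
  let cs := texto.toList
  let regions :=
    if cs.length ≤ 3 then (cs, ([] : List Char), ([] : List Char))
    else (PySem.List.slice cs none (some (3 : Int)),
          PySem.List.slice cs (some (3 : Int)) (some (-1 : Int)),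
          [PySem.List.pyGetD cs (-1) ' '])
  let head := pvLetterRules.foldl (fun s r => PySem.Chars.replace s [r.1] [r.2]) regions.1
  let middle := pvNumberRules.foldl (fun s r => PySem.Chars.replace s [r.1] [r.2]) regions.2.1
  String.ofList (head ++ middle ++ regions.2.2)

-- ===== PRECONDITION & SPEC =====
def Spec_correccion_logica (texto : String) (out : String) : Prop := out = correccion_logica_alt texto
instance (texto : String) (out : String) : Decidable (Spec_correccion_logica texto out) := by unfold Spec_correccion_logica; infer_instance

-- ===== CLAIM (what is proved, stated in full; the proofs are below) =====
def Claim_equal_correccion_logica : Prop := ∀ (texto : String), Dom_correccion_logica texto → Spec_correccion_logica texto (correccion_logica texto)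

-- ===== LEMMAS AND PROOFS =====

-- the value A's loop body writes at index i of a list of length n
def pvG (n i : Nat) (c : Char) : Char :=
  if 2 < i ∧ i + 1 < n then
    if c = 'B' then '8' else if c = 'D' then '0' else if c = 'S' then '5' else if c = 'G' then '6' else c
  else if i < 3 then
    if c = '1' ∨ c = 'I' then 'U' else if c = '5' then 'S' else c
  else c

-- single-character replace is a map
theorem pvReplace_go_single (o n : Char) (l acc : List Char) (fuel : Nat) (hf : l.length ≤ fuel) :
    PySem.Chars.replace.go [o] [n] fuel l acc
      = acc.reverse ++ l.map (fun c => if c = o then n else c) := by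
  induction l generalizing fuel acc with
  | nil => cases fuel <;> simp [PySem.Chars.replace.go]
  | cons c t ih =>
    cases fuel with
    | zero => simp at hf
    | succ m =>
      have ht : t.length ≤ m := by simpa using hf
      by_cases hco : o = c
      · subst hco
        simp [PySem.Chars.replace.go, List.isPrefixOf, ih _ _ ht]
      · have : ([o].isPrefixOf (c :: t)) = false := by
          simp [List.isPrefixOf]; exact fun h => (hco h).elim
        simp [PySem.Chars.replace.go, this, ih _ _ ht, Ne.symm hco]

theorem pvReplace_single (o n : Char) (l : List Char) :
    PySem.Chars.replace l [o] [n] = l.map (fun c => if c = o then n else c) := by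
  simp [PySem.Chars.replace, pvReplace_go_single o n l [] l.length le_rfl]

-- the per-character substitutions the two rule tables implement
def pvFLet (c : Char) : Char := if c = '1' ∨ c = 'I' then 'U' else if c = '5' then 'S' else c
def pvFNum (c : Char) : Char :=
  if c = 'B' then '8' else if c = 'D' then '0' else if c = 'S' then '5' else if c = 'G' then '6' else c

theorem pvLetter_fold (s : List Char) :
    pvLetterRules.foldl (fun s r => PySem.Chars.replace s [r.1] [r.2]) s = s.map pvFLet := by
  simp only [pvLetterRules, List.foldl_cons, List.foldl_nil, pvReplace_single, List.map_map]
  apply List.map_congr_left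
  intro c _
  simp only [Function.comp, pvFLet]
  by_cases h1 : c = '1' <;> by_cases hI : c = 'I' <;> by_cases h5 : c = '5' <;>
    simp_all

theorem pvNumber_fold (s : List Char) :
    pvNumberRules.foldl (fun s r => PySem.Chars.replace s [r.1] [r.2]) s = s.map pvFNum := by
  simp only [pvNumberRules, List.foldl_cons, List.foldl_nil, pvReplace_single, List.map_map]
  apply List.map_congr_left
  intro c _
  simp only [Function.comp, pvFNum]
  by_cases hB : c = 'B' <;> by_cases hD : c = 'D' <;> by_cases hS : c = 'S' <;> by_cases hG : c = 'G' <;>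
    simp_all

theorem pvStepA_eq_set (s : List Char) (k : Nat) (hk : k < s.length) :
    pvStepA s k = s.set k (pvG s.length k s[k]) := by
  have hc : s.getD k ' ' = s[k] := List.getD_eq_getElem s ' ' hk
  by_cases h1 : 2 < k ∧ k + 1 < s.length
  · have h2 : ¬ k < 3 := by omega
    simp only [pvStepA, pvG, hc, if_pos h1, if_neg h2]
    by_cases hB : s[k] = 'B'
    · simp [hB]
    by_cases hD : s[k] = 'D'
    · simp [hD]
    by_cases hS : s[k] = 'S'
    · simp [hS]
    by_cases hG : s[k] = 'G'
    · simp [hG]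
    simp [hB, hD, hS, hG, List.set_getElem_self]
  · simp only [pvStepA, pvG, hc, if_neg h1]
    by_cases h2 : k < 3
    · simp only [if_pos h2]
      by_cases hU : s[k] = '1' ∨ s[k] = 'I'
      · rcases hU with h | h <;> simp [h]
      by_cases h5 : s[k] = '5'
      · simp [h5]
      by_cases h0 : s[k] = '0'
      · simp [h0]
      simp [hU, h5, h0, List.set_getElem_self]
    · simp [if_neg h2, List.set_getElem_self]

theorem pv_loop (orig : List Char) (k : Nat) (hk : k ≤ orig.length) :
    (List.range' k (orig.length - k)).foldl pvStepA
      ((orig.take k).mapIdx (fun i c => pvG orig.length i c) ++ orig.drop k)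
    = orig.mapIdx (fun i c => pvG orig.length i c) := by
  set n := orig.length with hn
  obtain ⟨m, hm⟩ : ∃ m, n - k = m := ⟨n - k, rfl⟩
  induction m generalizing k with
  | zero =>
    have hkn : k = n := by omega
    subst hkn
    simp [List.take_of_length_le (le_of_eq hn.symm), List.drop_of_length_le (le_of_eq hn.symm)]
  | succ m ih =>
    have hkn : k < n := by omega
    have hkn' : k < orig.length := by omega
    have hrange : List.range' k (n - k) = k :: List.range' (k+1) m := by rw [hm]; rfl
    rw [hrange]
    simp only [List.foldl_cons]
    have hpre : ((orig.take k).mapIdx (fun i c => pvG n i c)).length = k := by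
      simp [List.length_mapIdx]; omega
    have hkk : k < ((orig.take k).mapIdx (fun i c => pvG n i c) ++ orig.drop k).length := by
      simp; omega
    have hstate : ((orig.take k).mapIdx (fun i c => pvG n i c) ++ orig.drop k).length = n := by
      simp; omega
    rw [pvStepA_eq_set _ k hkk]
    have hget : ((orig.take k).mapIdx (fun i c => pvG n i c) ++ orig.drop k)[k]'hkk = orig[k]'hkn' := by
      rw [List.getElem_append_right (by omega)]
      simp [hpre]
    have hset : ((orig.take k).mapIdx (fun i c => pvG n i c) ++ orig.drop k).set k
        (pvG n k (orig[k]'hkn')) =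
        (orig.take (k+1)).mapIdx (fun i c => pvG n i c) ++ orig.drop (k+1) := by
      rw [List.set_append_right _ _ (by omega), hpre, Nat.sub_self]
      have htake : orig.take (k+1) = orig.take k ++ [orig[k]'hkn'] := by
        rw [List.take_add_one]; simp [List.getElem?_eq_getElem hkn']
      rw [htake, List.mapIdx_append]
      rw [List.drop_eq_getElem_cons hkn']
      simp [List.length_take, Nat.min_eq_left (le_of_lt hkn')]
      rw [List.drop_eq_getElem_cons hkn']
      rfl
    rw [hstate, hget, hset]
    have := ih (k+1) (by omega) (by omega)
    rwa [show n - (k+1) = m by omega] at this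

theorem pvA_eq_mapIdx (orig : List Char) :
    (List.range orig.length).foldl pvStepA orig = orig.mapIdx (fun i c => pvG orig.length i c) := by
  have h := pv_loop orig 0 (Nat.zero_le _)
  simpa [List.range_eq_range'] using h

theorem pvG_letter (n i : Nat) (c : Char) (h3 : i < 3) (h : ¬(2 < i ∧ i + 1 < n)) :
    pvG n i c = pvFLet c := by
  unfold pvG pvFLet; rw [if_neg h, if_pos h3]

theorem pvG_number (n i : Nat) (c : Char) (h : 2 < i ∧ i + 1 < n) :
    pvG n i c = pvFNum c := by
  unfold pvG pvFNum; rw [if_pos h]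

theorem pvG_id (n i : Nat) (c : Char) (h : ¬(2 < i ∧ i + 1 < n)) (h3 : ¬ i < 3) :
    pvG n i c = c := by
  unfold pvG; rw [if_neg h, if_neg h3]

theorem pvB_eq_mapIdx (orig : List Char) :
    (if orig.length ≤ 3 then
      String.ofList (orig.map pvFLet ++ ([] : List Char).map pvFNum ++ ([] : List Char))
    else
      String.ofList ((PySem.List.slice orig none (some (3 : Int))).map pvFLet ++
        (PySem.List.slice orig (some (3 : Int)) (some (-1 : Int))).map pvFNum ++
        [PySem.List.pyGetD orig (-1) ' ']))
    = String.ofList (orig.mapIdx (fun i c => pvG orig.length i c)) := by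
  set n := orig.length with hn
  have hhead : PySem.List.slice orig none (some (3 : Int)) = orig.take 3 := by
    simpa using PySem.List.slice_to_natCast (xs := orig) (b := 3)
  by_cases hle : n ≤ 3
  · rw [if_pos hle]
    simp only [List.map_nil, List.append_nil]
    congr 1
    apply List.ext_getElem (by simp)
    intro i h1 h2
    have hin : i < n := by simp only [List.length_map] at h1; omega
    rw [List.getElem_map, List.getElem_mapIdx,
      pvG_letter n i _ (by omega) (by omega)]
  · rw [if_neg hle, hhead]
    have hmid : PySem.List.slice orig (some (3 : Int)) (some (-1 : Int)) = (orig.drop 3).take (n - 4) := by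
      have hmin : min 3 orig.length = 3 := by omega
      simp [PySem.List.slice, hmin]
      omega
    have hlast : PySem.List.pyGetD orig (-1) ' ' = orig[n-1]'(by omega) := by
      rw [PySem.List.pyGetD_neg_ofNat orig 1 ' ' (by omega) (by omega)]
    rw [hmid, hlast]
    congr 1
    apply List.ext_getElem (by simp; omega)
    intro i h1 h2
    have hin : i < n := by simp only [List.length_mapIdx] at h2; omega
    rw [List.getElem_mapIdx]
    have hlen3 : ((orig.take 3).map pvFLet).length = 3 := by
      simp; omega
    by_cases hi3 : i < 3
    · rw [List.getElem_append_left (by simp; omega), List.getElem_append_left (by omega)]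
      rw [List.getElem_map, List.getElem_take, pvG_letter n i _ (by omega) (by omega)]
    · by_cases him : i < n - 1
      · rw [List.getElem_append_left (by simp; omega), List.getElem_append_right (by omega)]
        rw [List.getElem_map, List.getElem_take, List.getElem_drop,
          pvG_number n i _ (by constructor <;> omega)]
        simp only [hlen3, show 3 + (i - 3) = i from by omega]
      · rw [List.getElem_append_right (by simp; omega)]
        have hz : (i - (((orig.take 3).map pvFLet).length +
            (((orig.drop 3).take (n - 4)).map pvFNum).length)) = 0 := by
          simp; omega
        simp only [List.length_append, hz, List.getElem_singleton]
        rw [pvG_id n i _ (by omega) (by omega)]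
        exact (getElem_congr rfl (by omega : i = n - 1) (by omega)).symm

-- ===== VERDICT (by name: the statement is the Claim_ definition above) =====
theorem correccion_logica_spec : Claim_equal_correccion_logica := by
  intro texto _
  show correccion_logica texto = correccion_logica_alt texto
  unfold correccion_logica correccion_logica_alt
  simp only
  rw [pvA_eq_mapIdx]
  by_cases hle : texto.toList.length ≤ 3
  · rw [← pvB_eq_mapIdx texto.toList, if_pos hle, if_pos hle]
    simp [pvLetter_fold, pvNumber_fold]
  · rw [← pvB_eq_mapIdx texto.toList, if_neg hle, if_neg hle]
    simp [pvLetter_fold, pvNumber_fold]
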